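-- pv_equiv track=rewrite | github.com/faulknerrainford/SimNet | AnalysisScripts.py | counters
-- ===== SOURCE A (Python) =====
-- def counters(agent_log):
--     mild = 0
--     moderate = 0
--     severe = 0
--     recovery = 0
--     for entry in agent_log:
--         if entry[0] == "Mild Fall":
--             mild = mild + 1
--         elif entry[0] == "Moderate Fall":
--             moderate = moderate + 1
--         elif entry[0] == "Sever Fall":
--             severe = severe + 1
--         elif entry[0] == "Severe Fall":
--             severe = severe + 1
--         elif entry[0] == "Healthy":
--             recovery = recovery + 1
--     falls = mild + moderate + severe
--     return [mild, moderate, severe, falls, recovery]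
-- ===== SOURCE B (Python) =====
-- def counters(agent_log):
--     # Staged passes: project out the first column once, then let list.count
--     # scan it per category; no per-entry branching or accumulators.
--     heads = [entry[0] for entry in agent_log]
--     mild = heads.count("Mild Fall")
--     moderate = heads.count("Moderate Fall")
--     severe = heads.count("Sever Fall") + heads.count("Severe Fall")
--     recovery = heads.count("Healthy")
--     return [mild, moderate, severe, mild + moderate + severe, recovery]
-- ===== Notes on version B (the rewrite author's own statement) =====
-- stated objective: idiomatic
-- what changed: Replaces the single branching accumulator loop with staged passes: project the first column once, then compute each category total by a separate list.count scan.
import Mathlib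
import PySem

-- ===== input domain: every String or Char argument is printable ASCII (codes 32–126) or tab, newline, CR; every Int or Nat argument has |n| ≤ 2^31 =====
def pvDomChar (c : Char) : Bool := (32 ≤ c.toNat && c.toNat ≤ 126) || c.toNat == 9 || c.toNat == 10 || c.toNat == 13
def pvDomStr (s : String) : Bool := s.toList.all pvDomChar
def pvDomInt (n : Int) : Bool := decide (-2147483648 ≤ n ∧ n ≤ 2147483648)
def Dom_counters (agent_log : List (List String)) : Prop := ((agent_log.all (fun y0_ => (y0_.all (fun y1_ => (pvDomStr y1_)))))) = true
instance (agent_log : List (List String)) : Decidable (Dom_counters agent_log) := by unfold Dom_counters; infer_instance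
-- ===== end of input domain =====

-- B replaces A's branching accumulator loop with staged passes: project the first column
-- once, then compute each category total by a separate list.count scan (idiomatic).


-- ===== PORT A =====
-- A's loop over agent_log with four integer accumulators; entry[0] raises IndexError on an
-- empty entry (returns [] here; such inputs are excluded by Pre_counters).
def countersLoop : List (List String) → Int → Int → Int → Int → List Int
  | [], mild, moderate, severe, recovery =>
      [mild, moderate, severe, mild + moderate + severe, recovery]
  | entry :: rest, mild, moderate, severe, recovery =>
      match PySem.List.pyGet? entry 0 with
      | none => []  -- IndexError
      | some h =>
        if h == "Mild Fall" then countersLoop rest (mild + 1) moderate severe recovery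
        else if h == "Moderate Fall" then countersLoop rest mild (moderate + 1) severe recovery
        else if h == "Sever Fall" then countersLoop rest mild moderate (severe + 1) recovery
        else if h == "Severe Fall" then countersLoop rest mild moderate (severe + 1) recovery
        else if h == "Healthy" then countersLoop rest mild moderate severe (recovery + 1)
        else countersLoop rest mild moderate severe recovery

def counters (agent_log : List (List String)) : List Int :=
  countersLoop agent_log 0 0 0 0

-- ===== PORT B =====
-- heads = [entry[0] for entry in agent_log]; entry[0] raises (none) on an empty entry.
def headsOf : List (List String) → Option (List String)
  | [] => some []
  | entry :: rest =>
      match PySem.List.pyGet? entry 0 with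
      | none => none  -- IndexError
      | some h => (headsOf rest).map (h :: ·)

def counters_alt (agent_log : List (List String)) : List Int :=
  match headsOf agent_log with
  | none => []
  | some heads =>
      let mild : Int := PySem.List.count heads "Mild Fall"
      let moderate : Int := PySem.List.count heads "Moderate Fall"
      let severe : Int := PySem.List.count heads "Sever Fall" + PySem.List.count heads "Severe Fall"
      let recovery : Int := PySem.List.count heads "Healthy"
      [mild, moderate, severe, mild + moderate + severe, recovery]

-- ===== PRECONDITION & SPEC =====
-- Pre_ excludes logs containing an empty entry: on those, A (and B) raise IndexError at entry[0].
def Pre_counters (agent_log : List (List String)) : Prop :=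
  ∀ e ∈ agent_log, e ≠ []
instance (agent_log : List (List String)) : Decidable (Pre_counters agent_log) := by
  unfold Pre_counters; infer_instance

def pvWitness_counters : List (List String) :=
  [["Mild Fall", "a"], ["Healthy"], ["Sever Fall", "x"]]

def Spec_counters (agent_log : List (List String)) (out : List Int) : Prop := out = counters_alt agent_log
instance (agent_log : List (List String)) (out : List Int) : Decidable (Spec_counters agent_log out) := by unfold Spec_counters; infer_instance

-- ===== CLAIM (what is proved, stated in full; the proofs are below) =====
def Claim_equal_counters : Prop := ∀ (agent_log : List (List String)), Dom_counters agent_log → Pre_counters agent_log → Spec_counters agent_log (counters agent_log)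

-- ===== LEMMAS AND PROOFS =====

-- heads of the log (proof-side; defined for nonempty entries)
def pvHeads (agent_log : List (List String)) : List String :=
  agent_log.map (fun e => e.headD "")

lemma countersLoop_eq (agent_log : List (List String))
    (hp : ∀ e ∈ agent_log, e ≠ []) (m mo s r : Int) :
    countersLoop agent_log m mo s r =
      [m + ((pvHeads agent_log).count "Mild Fall" : Int),
       mo + ((pvHeads agent_log).count "Moderate Fall" : Int),
       s + ((pvHeads agent_log).count "Sever Fall" : Int)
         + ((pvHeads agent_log).count "Severe Fall" : Int),
       m + mo + s + ((pvHeads agent_log).count "Mild Fall" : Int)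
         + ((pvHeads agent_log).count "Moderate Fall" : Int)
         + ((pvHeads agent_log).count "Sever Fall" : Int)
         + ((pvHeads agent_log).count "Severe Fall" : Int),
       r + ((pvHeads agent_log).count "Healthy" : Int)] := by
  induction agent_log generalizing m mo s r with
  | nil => simp [countersLoop, pvHeads]
  | cons e rest ih =>
    have he : e ≠ [] := hp e (by simp)
    obtain ⟨h, t, rfl⟩ := List.exists_cons_of_ne_nil he
    have hrest : ∀ x ∈ rest, x ≠ [] := fun x hx => hp x (by simp [hx])
    simp only [countersLoop, PySem.List.pyGet?_zero_cons, pvHeads, List.map_cons,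
      List.headD_cons, List.count_cons]
    by_cases h1 : h = "Mild Fall"
    · simp [h1, ih hrest, pvHeads]; omega
    · by_cases h2 : h = "Moderate Fall"
      · simp [h1, h2, ih hrest, pvHeads]; omega
      · by_cases h3 : h = "Sever Fall"
        · simp [h1, h2, h3, ih hrest, pvHeads]; omega
        · by_cases h4 : h = "Severe Fall"
          · simp [h1, h2, h3, h4, ih hrest, pvHeads]; omega
          · by_cases h5 : h = "Healthy"
            · simp [h1, h2, h3, h4, h5, ih hrest, pvHeads]; omega
            · simp [h1, h2, h3, h4, h5, ih hrest, pvHeads]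

lemma headsOf_eq (agent_log : List (List String))
    (hp : ∀ e ∈ agent_log, e ≠ []) :
    headsOf agent_log = some (pvHeads agent_log) := by
  induction agent_log with
  | nil => simp [headsOf, pvHeads]
  | cons e rest ih =>
    have he : e ≠ [] := hp e (by simp)
    obtain ⟨h, t, rfl⟩ := List.exists_cons_of_ne_nil he
    have hrest : ∀ x ∈ rest, x ≠ [] := fun x hx => hp x (by simp [hx])
    simp [headsOf, PySem.List.pyGet?_zero_cons, pvHeads, ih hrest]

-- ===== VERDICT (by name: the statement is the Claim_ definition above) =====
theorem counters_spec : Claim_equal_counters := by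
  intro agent_log _ hpre
  unfold Spec_counters counters counters_alt
  rw [countersLoop_eq agent_log hpre, headsOf_eq agent_log hpre]
  simp [PySem.List.count_eq]; omega
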